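-- pv_equiv track=rewrite | github.com/NirmalaVishwaVidyaPeetham/ClassMaterial | 2. MathsProgrammingTechnology/2. ProgrammingAndAlgorithms/2. Grade2/0.PythonBasicsProject_Grade2/3. HW-05122025-Programming-HW-exersises-Corrected.py | check_product_rule_2
-- ===== SOURCE A (Python) =====
-- def check_product_rule_2(a, b, n):
--     power_ab = 1
--     ans_a = 1
--     ans_b = 1
--     for i1 in range(0, n, 1):
--         power_ab *= a * b
--     for i2 in range(0, n, 1):
--         ans_a *= a
--     for i3 in range(0, n, 1):
--         ans_b *= b
--     if power_ab == ans_a * ans_b: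
--         return True
--     else:
--         return False
-- ===== SOURCE B (Python) =====
-- def check_product_rule_2(a, b, n):
--     # (a*b)**n == a**n * b**n holds for all integers; no loop needed.
--     return True
-- ===== Notes on version B (the rewrite author's own statement) =====
-- stated objective: faster
-- what changed: B replaces the three O(n) multiplication loops by the constant-time closed form: the identity (a*b)^n = a^n * b^n always holds over the integers, so B returns True directly.
import Mathlib
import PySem

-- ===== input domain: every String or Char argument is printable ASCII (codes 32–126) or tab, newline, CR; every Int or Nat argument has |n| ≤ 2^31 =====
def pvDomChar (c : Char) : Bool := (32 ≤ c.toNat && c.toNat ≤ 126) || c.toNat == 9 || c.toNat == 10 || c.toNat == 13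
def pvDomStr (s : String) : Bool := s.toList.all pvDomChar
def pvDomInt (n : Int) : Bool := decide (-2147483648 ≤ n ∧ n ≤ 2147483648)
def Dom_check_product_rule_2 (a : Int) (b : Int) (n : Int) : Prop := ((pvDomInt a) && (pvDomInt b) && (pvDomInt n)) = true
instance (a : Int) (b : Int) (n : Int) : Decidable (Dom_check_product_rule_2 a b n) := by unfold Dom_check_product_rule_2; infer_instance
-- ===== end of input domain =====

-- B replaces A's three O(n) multiplication loops by the O(1) closed form: (a*b)^n = a^n * b^n always holds over ℤ, so the answer is always True.

-- ===== PORT A =====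
def check_product_rule_2 (a : Int) (b : Int) (n : Int) : Bool :=
  let power_ab := (PySem.List.pyRange 0 n 1).foldl (fun acc _ => acc * (a * b)) 1
  let ans_a := (PySem.List.pyRange 0 n 1).foldl (fun acc _ => acc * a) 1
  let ans_b := (PySem.List.pyRange 0 n 1).foldl (fun acc _ => acc * b) 1
  if power_ab = ans_a * ans_b then true else false

-- ===== PORT B =====
def check_product_rule_2_alt (_a : Int) (_b : Int) (_n : Int) : Bool :=
  true

-- ===== PRECONDITION & SPEC =====
def Spec_check_product_rule_2 (a : Int) (b : Int) (n : Int) (out : Bool) : Prop := out = check_product_rule_2_alt a b n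
instance (a : Int) (b : Int) (n : Int) (out : Bool) : Decidable (Spec_check_product_rule_2 a b n out) := by unfold Spec_check_product_rule_2; infer_instance

-- ===== CLAIM (what is proved, stated in full; the proofs are below) =====
def Claim_equal_check_product_rule_2 : Prop := ∀ (a : Int) (b : Int) (n : Int), Dom_check_product_rule_2 a b n → Spec_check_product_rule_2 a b n (check_product_rule_2 a b n)

-- ===== LEMMAS AND PROOFS =====

-- A fold multiplying the accumulator by a constant c once per element is x * c ^ length.
theorem foldl_mul_const (c : Int) (l : List Int) (x : Int) :
    l.foldl (fun acc _ => acc * c) x = x * c ^ l.length := by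
  induction l generalizing x with
  | nil => simp
  | cons h t ih => simp [List.foldl, ih, pow_succ]; ring

-- ===== VERDICT (by name: the statement is the Claim_ definition above) =====
theorem check_product_rule_2_spec : Claim_equal_check_product_rule_2 := by
  intro a b n _
  unfold Spec_check_product_rule_2 check_product_rule_2 check_product_rule_2_alt
  simp [foldl_mul_const, mul_pow]
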